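-- pv_equiv track=rewrite | github.com/ActiveInferenceInstitute/GeneralizedNotationNotation | src/gui/gui_1/markdown.py | remove_component_from_markdown
-- ===== SOURCE A (Python) =====
-- def remove_component_from_markdown(md_text: str, name: str) -> str:
--     """
--     Remove a component block from the components list by name. Leaves other content intact.
--     """
--     lines = md_text.splitlines()
--     out: list[str] = []
--     i = 0
--     while i < len(lines):
--         line = lines[i]
--         if line.strip().startswith("- name:") and line.strip() == f"- name: {name}":
--             i += 1
--             while i < len(lines) and (lines[i].startswith(" ") or not lines[i].strip()):
--                 if lines[i].strip().startswith("- name:"):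
--                     break
--                 i += 1
--             continue
--         out.append(line)
--         i += 1
--     result = "\n".join(out)
--     if not result.endswith("\n"):
--         result += "\n"
--     return result
-- ===== SOURCE B (Python) =====
-- def remove_component_from_markdown(md_text: str, name: str) -> str:
--     """
--     Remove a component block from the components list by name. Leaves other content intact.
--     One-pass line-classifying state machine: a boolean 'skipping' state replaces the nested
--     index-driven while loops; each line is kept or dropped by a single per-line rule.
--     """
--     header = f"- name: {name}"
--     kept = []
--     skipping = False
--     for line in md_text.splitlines():
--         s = line.strip()
--         if s == header:
--             skipping = True          # (re)enter skip mode; drop the header line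
--         elif skipping and (line.startswith(" ") or not s) and not s.startswith("- name:"):
--             pass                     # body line of the removed block: drop it
--         else:
--             kept.append(line)
--             skipping = False
--     result = "\n".join(kept)
--     return result if result.endswith("\n") else result + "\n"
-- ===== Notes on version B (the rewrite author's own statement) =====
-- stated objective: simpler
-- what changed: A's nested index-driven while loops (outer scan with an inner body-skipping while) are replaced by one fold over the lines with a boolean 'skipping' state that classifies each line by a single per-line rule.
import Mathlib
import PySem

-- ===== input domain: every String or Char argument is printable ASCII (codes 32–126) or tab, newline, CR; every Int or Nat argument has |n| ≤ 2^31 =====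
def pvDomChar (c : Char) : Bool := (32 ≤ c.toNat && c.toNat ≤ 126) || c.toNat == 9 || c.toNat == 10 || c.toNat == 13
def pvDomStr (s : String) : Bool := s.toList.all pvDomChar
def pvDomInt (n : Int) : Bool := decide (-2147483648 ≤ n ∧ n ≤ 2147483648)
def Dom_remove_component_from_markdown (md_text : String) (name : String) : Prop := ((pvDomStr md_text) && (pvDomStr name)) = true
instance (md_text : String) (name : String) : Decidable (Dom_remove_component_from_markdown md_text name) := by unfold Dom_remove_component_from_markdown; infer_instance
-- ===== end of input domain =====

-- B replaces A's nested index-driven while loops by a single fold with a boolean 'skipping'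
-- state that classifies each line once; same result, proved equal on all inputs.

-- ===== PORT A =====
-- inner while: consume body lines (indented or blank), stopping (without consuming) at a '- name:' line
def pvSkipA : List String → List String
  | [] => []
  | l :: rest =>
    if PySem.Str.startswith l " " || PySem.Str.strip l == "" then
      if PySem.Str.startswith (PySem.Str.strip l) "- name:" then l :: rest
      else pvSkipA rest
    else l :: rest

theorem pvSkipA_length_le (ls : List String) : (pvSkipA ls).length ≤ ls.length := by
  induction ls with
  | nil => simp [pvSkipA]
  | cons l rest ih =>
    simp only [pvSkipA]
    split
    · split
      · simp
      · exact le_trans ih (by simp)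
    · simp

-- outer while over the lines, building `out`
def pvGoA (name : String) : List String → List String
  | [] => []
  | l :: rest =>
    if PySem.Str.startswith (PySem.Str.strip l) "- name:" &&
       PySem.Str.strip l == "- name: " ++ name then
      pvGoA name (pvSkipA rest)
    else l :: pvGoA name rest
termination_by ls => ls.length
decreasing_by
  · exact Nat.lt_succ_of_le (pvSkipA_length_le rest)
  · simp

def remove_component_from_markdown (md_text : String) (name : String) : String :=
  let lines := PySem.Str.splitlines md_text
  let out := pvGoA name lines
  let result := PySem.Str.join "\n" out
  if !PySem.Str.endswith result "\n" then result ++ "\n" else result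

-- ===== PORT B =====
-- the body of B's for-loop: one step of the state machine on state (kept, skipping)
def pvStepB (header : String) (st : List String × Bool) (l : String) : List String × Bool :=
  let s := PySem.Str.strip l
  if s == header then (st.1, true)
  else if st.2 && (PySem.Str.startswith l " " || s == "") && !(PySem.Str.startswith s "- name:") then st
  else (st.1 ++ [l], false)

def remove_component_from_markdown_alt (md_text : String) (name : String) : String :=
  let header := "- name: " ++ name
  let st := (PySem.Str.splitlines md_text).foldl (pvStepB header) ([], false)
  let result := PySem.Str.join "\n" st.1
  if PySem.Str.endswith result "\n" then result else result ++ "\n"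

-- ===== PRECONDITION & SPEC =====
def Spec_remove_component_from_markdown (md_text : String) (name : String) (out : String) : Prop := out = remove_component_from_markdown_alt md_text name
instance (md_text : String) (name : String) (out : String) : Decidable (Spec_remove_component_from_markdown md_text name out) := by unfold Spec_remove_component_from_markdown; infer_instance

-- ===== CLAIM =====
def Claim_equal_remove_component_from_markdown : Prop := ∀ (md_text : String) (name : String), Dom_remove_component_from_markdown md_text name → Spec_remove_component_from_markdown md_text name (remove_component_from_markdown md_text name)

-- ===== LEMMAS AND PROOFS =====

-- proof-only recursive rendering of B's state machine (the lines it keeps from state b)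
def pvGoB (name : String) : Bool → List String → List String
  | _, [] => []
  | b, l :: r =>
    if PySem.Str.strip l == "- name: " ++ name then pvGoB name true r
    else if b && (PySem.Str.startswith l " " || PySem.Str.strip l == "") &&
            !(PySem.Str.startswith (PySem.Str.strip l) "- name:") then pvGoB name b r
    else l :: pvGoB name false r

-- the header line always starts with "- name:"
theorem pvHeader_startswith (name : String) :
    PySem.Str.startswith ("- name: " ++ name) "- name:" = true := by
  simp only [PySem.Str.startswith_eq]
  rw [PySem.Chars.startswith_iff]
  have h1 : ("- name:" : String).toList <+: ("- name: " : String).toList := by decide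
  calc ("- name:" : String).toList <+: ("- name: " : String).toList := h1
    _ <+: ("- name: " : String).toList ++ name.toList := List.prefix_append _ _
    _ = ("- name: " ++ name).toList := by simp

-- B's fold accumulates kept ++ (the lines pvGoB keeps)
theorem pvFoldB_eq (name : String) (ls : List String) :
    ∀ (kept : List String) (b : Bool),
      (ls.foldl (pvStepB ("- name: " ++ name)) (kept, b)).1 = kept ++ pvGoB name b ls := by
  induction ls with
  | nil => intro kept b; simp [pvGoB]
  | cons l r ih =>
    intro kept b
    simp only [List.foldl_cons, pvStepB, pvGoB]
    split
    · rw [ih]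
    · split
      · rw [ih]
      · rw [ih]; simp

-- the state machine from state false = A's outer loop; from state true = A's loop after its inner skip
theorem pvGoB_eq_goA (name : String) (ls : List String) :
    pvGoB name false ls = pvGoA name ls ∧ pvGoB name true ls = pvGoA name (pvSkipA ls) := by
  induction ls with
  | nil => simp [pvGoB, pvGoA, pvSkipA]
  | cons l r ih =>
    obtain ⟨ihF, ihT⟩ := ih
    by_cases hh : PySem.Str.strip l == ("- name: " ++ name)
    · have hsw : PySem.Str.startswith (PySem.Str.strip l) "- name:" = true := by
        rw [eq_of_beq hh]; exact pvHeader_startswith name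
      constructor
      · rw [pvGoB, if_pos hh, pvGoA, if_pos (by rw [hsw, hh]; rfl), ihT]
      · rw [pvGoB, if_pos hh]
        by_cases hc : (PySem.Str.startswith l " " || PySem.Str.strip l == "") = true
        · -- skip loop sees the stop condition: does not consume l
          rw [show pvSkipA (l :: r) = l :: r by rw [pvSkipA, if_pos hc, if_pos hsw]]
          rw [pvGoA, if_pos (by rw [hsw, hh]; rfl), ihT]
        · rw [show pvSkipA (l :: r) = l :: r by rw [pvSkipA, if_neg hc]]
          rw [pvGoA, if_pos (by rw [hsw, hh]; rfl), ihT]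
    · have hA : (PySem.Str.startswith (PySem.Str.strip l) "- name:" &&
          PySem.Str.strip l == "- name: " ++ name) = false := by
        cases h : (PySem.Str.strip l == "- name: " ++ name) <;> simp_all
      constructor
      · rw [pvGoB, if_neg hh, if_neg (by simp), pvGoA, hA]
        simp [ihF]
      · rw [pvGoB, if_neg hh]
        by_cases hc : (PySem.Str.startswith l " " || PySem.Str.strip l == "") = true
        · by_cases hn : PySem.Str.startswith (PySem.Str.strip l) "- name:" = true
          · -- stop line that is not the header: skip returns it, A keeps it
            rw [if_neg (by rw [hc, hn]; decide)]
            rw [show pvSkipA (l :: r) = l :: r by rw [pvSkipA, if_pos hc, if_pos hn]]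
            rw [pvGoA, hA]
            simp [ihF]
          · have hn' : PySem.Str.startswith (PySem.Str.strip l) "- name:" = false := by
              revert hn; cases PySem.Str.startswith (PySem.Str.strip l) "- name:" <;> simp
            rw [if_pos (by rw [hc, hn']; decide)]
            rw [show pvSkipA (l :: r) = pvSkipA r by
              rw [pvSkipA, if_pos hc, if_neg (by simpa using hn)]]
            exact ihT
        · have hc' : (PySem.Str.startswith l " " || PySem.Str.strip l == "") = false := by
            revert hc; cases (PySem.Str.startswith l " " || PySem.Str.strip l == "") <;> simp
          rw [if_neg (by rw [hc']; simp)]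
          rw [show pvSkipA (l :: r) = l :: r by rw [pvSkipA, if_neg hc]]
          rw [pvGoA, hA]
          simp [ihF]

-- ===== VERDICT =====
theorem remove_component_from_markdown_spec : Claim_equal_remove_component_from_markdown := by
  intro md_text name _
  unfold Spec_remove_component_from_markdown
  simp only [remove_component_from_markdown, remove_component_from_markdown_alt]
  rw [pvFoldB_eq name (PySem.Str.splitlines md_text) [] false,
    (pvGoB_eq_goA name (PySem.Str.splitlines md_text)).1]
  simp only [List.nil_append]
  cases PySem.Str.endswith (PySem.Str.join "\n" (pvGoA name (PySem.Str.splitlines md_text))) "\n" <;> rfl
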